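-- pv_equiv track=rewrite | github.com/ano010/House-Price-Prediction-using-Machine-Learning | data_preprocessing/code/feature_match.py | compare_str
-- ===== SOURCE A (Python) =====
-- def compare_str(tokens, word):
--     i = -23
--     try:
--         i = tokens.index(word)
--     except ValueError:
--         try:
--             i = [index for (index, w)  in enumerate(tokens) if w.find(word) != -1][0]
--
--         except IndexError:
--             pass
--     return i
-- ===== SOURCE B (Python) =====
-- def compare_str(tokens, word):
--     first_sub = None
--     for i, token in enumerate(tokens):
--         if token == word:
--             return i
--         if first_sub is None and token.find(word) != -1:
--             first_sub = i
--     return first_sub if first_sub is not None else -23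
-- ===== Notes on version B (the rewrite author's own statement) =====
-- stated objective: simpler
-- what changed: Replaces A's two separate scans (tokens.index inside try/except plus a full enumerate-filter comprehension) by one fused pass that returns early on an exact match and remembers the first substring match, with no exception handling.
import Mathlib
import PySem

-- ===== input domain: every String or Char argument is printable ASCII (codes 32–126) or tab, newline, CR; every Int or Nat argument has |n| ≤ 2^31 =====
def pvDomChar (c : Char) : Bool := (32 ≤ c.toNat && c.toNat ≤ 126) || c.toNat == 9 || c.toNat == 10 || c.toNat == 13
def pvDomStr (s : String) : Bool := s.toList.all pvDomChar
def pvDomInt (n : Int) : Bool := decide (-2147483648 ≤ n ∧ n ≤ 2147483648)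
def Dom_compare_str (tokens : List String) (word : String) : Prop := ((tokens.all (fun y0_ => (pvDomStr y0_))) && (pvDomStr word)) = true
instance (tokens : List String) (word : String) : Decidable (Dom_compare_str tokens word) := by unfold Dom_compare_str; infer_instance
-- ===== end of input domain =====

-- B replaces A's two scans (tokens.index in try/except plus an enumerate-filter comprehension)
-- by one fused pass with an early return on exact match; objective: simpler.

-- ===== PORT A =====
def compare_str (tokens : List String) (word : String) : Int :=
  match PySem.List.index? tokens word with
  | some i => (i : Int)
  | none =>
    match (((PySem.List.enumerate tokens 0).filter
              (fun p => PySem.Str.find p.2 word != -1)).map (fun p => p.1))[0]? with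
    | some j => j
    | none => -23

-- ===== PORT B =====
def compareGo (word : String) : List String → Nat → Option Int → Int
  | [], _, firstSub => firstSub.getD (-23)
  | t :: rest, i, firstSub =>
    if t == word then (i : Int)
    else compareGo word rest (i + 1)
      (if firstSub.isNone && (PySem.Str.find t word != -1) then some (i : Int) else firstSub)

def compare_str_alt (tokens : List String) (word : String) : Int :=
  compareGo word tokens 0 none

-- ===== PRECONDITION & SPEC =====
def Spec_compare_str (tokens : List String) (word : String) (out : Int) : Prop := out = compare_str_alt tokens word
instance (tokens : List String) (word : String) (out : Int) : Decidable (Spec_compare_str tokens word out) := by unfold Spec_compare_str; infer_instance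

-- ===== CLAIM (what is proved, stated in full; the proofs are below) =====
def Claim_equal_compare_str : Prop := ∀ (tokens : List String) (word : String), Dom_compare_str tokens word → Spec_compare_str tokens word (compare_str tokens word)

-- ===== LEMMAS AND PROOFS =====

theorem compareGo_eq (word : String) (ts : List String) (i : Nat) (acc : Option Int) :
    compareGo word ts i acc =
      match PySem.List.index? ts word with
      | some k => ((i + k : Nat) : Int)
      | none =>
        match acc with
        | some j => j
        | none =>
          match (((PySem.List.enumerate ts (i : Int)).filter
                    (fun p => PySem.Str.find p.2 word != -1)).map (fun p => p.1))[0]? with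
          | some j => j
          | none => -23 := by
  induction ts generalizing i acc with
  | nil => cases acc <;> simp [compareGo, PySem.List.index?_eq_idxOf?, PySem.List.enumerate_nil, Option.getD]
  | cons t rest ih =>
    by_cases ht : t = word
    · subst ht
      simp [compareGo, PySem.List.index?_eq_idxOf?, List.idxOf?_cons]
    · have hne : (t == word) = false := by simp [ht]
      rw [PySem.List.index?_cons_of_ne rest ht, PySem.List.enumerate_cons]
      simp only [compareGo, hne, Bool.false_eq_true, if_false, ih]
      have hcast : ((i + 1 : Nat) : Int) = (i : Int) + 1 := by push_cast; ring
      by_cases hf : PySem.Chars.find t.toList word.toList = -1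
      · cases acc <;>
          cases hk : PySem.List.index? rest word <;>
            simp [PySem.Str.find_eq, hf, hcast, Option.map, hk, List.filter_cons] <;> push_cast <;> ring
      · cases acc <;>
          cases hk : PySem.List.index? rest word <;>
            simp [PySem.Str.find_eq, hf, hcast, Option.map, hk, List.filter_cons] <;> push_cast <;> ring

-- ===== VERDICT (by name: the statement is the Claim_ definition above) =====
theorem compare_str_spec : Claim_equal_compare_str := by
  intro tokens word _
  unfold Spec_compare_str compare_str compare_str_alt
  rw [compareGo_eq]
  cases hk : PySem.List.index? tokens word <;> simp [hk]
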